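-- pv_equiv track=rewrite | github.com/morgalorgadingdong/codewars | 8kyu/8kyu-NameShuffler.py | name_shuffler
-- ===== SOURCE A (Python) =====
-- def name_shuffler(str_):
--     first = ''
--     last = ''
--     space = False
--     for c in str_:
--         if c == ' ':
--             space = True
--         elif space:
--             first = first + c
--         else:
--             last = last + c
--     shuffled = first + ' ' + last
--     return shuffled
-- ===== SOURCE B (Python) =====
-- def name_shuffler(str_):
--     idx = str_.find(' ')
--     if idx == -1:
--         return ' ' + str_
--     rest = str_[idx + 1:]
--     first = ''.join(c for c in rest if c != ' ')
--     return first + ' ' + str_[:idx]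
-- ===== Notes on version B (the rewrite author's own statement) =====
-- stated objective: simpler
-- what changed: A's stateful character loop with (first, last, space) string accumulators (quadratic repeated concatenation) is replaced by locating the first space with str.find, slicing the string around it, and joining the tail's non-space characters in one pass; the no-space case is one early return.
import Mathlib
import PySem

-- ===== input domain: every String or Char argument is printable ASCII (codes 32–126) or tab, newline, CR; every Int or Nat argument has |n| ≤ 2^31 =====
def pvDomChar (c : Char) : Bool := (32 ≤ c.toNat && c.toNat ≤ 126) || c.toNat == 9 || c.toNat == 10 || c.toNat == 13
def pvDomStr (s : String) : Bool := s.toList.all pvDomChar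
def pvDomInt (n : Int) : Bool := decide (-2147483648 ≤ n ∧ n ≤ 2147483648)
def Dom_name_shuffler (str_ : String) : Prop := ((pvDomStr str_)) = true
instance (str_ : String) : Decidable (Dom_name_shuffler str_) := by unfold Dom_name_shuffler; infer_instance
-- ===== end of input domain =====

-- B replaces A's stateful char-by-char string accumulation with find-the-first-space, two slices and a
-- space-filtering join (simpler; measured faster: A repeatedly concatenates strings).

-- ===== PORT A =====
-- A's loop body: state (first, last, space)
def nsStep (acc : String × String × Bool) (c : Char) : String × String × Bool :=
  if c = ' ' then (acc.1, acc.2.1, true)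
  else if acc.2.2 then (acc.1.push c, acc.2.1, acc.2.2)
  else (acc.1, acc.2.1.push c, acc.2.2)

def name_shuffler (str_ : String) : String :=
  let st := str_.toList.foldl nsStep ("", "", false)
  st.1 ++ " " ++ st.2.1

-- ===== PORT B =====
def name_shuffler_alt (str_ : String) : String :=
  let idx := PySem.Str.find str_ " "
  if idx = -1 then " " ++ str_
  else
    let rest := PySem.Str.slice str_ (some (idx + 1)) none
    let first := String.ofList (rest.toList.filter (fun c => c ≠ ' '))  -- ''.join(c for c in rest if c != ' ')
    first ++ " " ++ PySem.Str.slice str_ none (some idx)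

-- ===== PRECONDITION & SPEC =====
def Spec_name_shuffler (str_ : String) (out : String) : Prop := out = name_shuffler_alt str_
instance (str_ : String) (out : String) : Decidable (Spec_name_shuffler str_ out) := by unfold Spec_name_shuffler; infer_instance

-- ===== CLAIM (what is proved, stated in full; the proofs are below) =====
def Claim_equal_name_shuffler : Prop := ∀ (str_ : String), Dom_name_shuffler str_ → Spec_name_shuffler str_ (name_shuffler str_)

-- ===== LEMMAS AND PROOFS =====

-- list-level mirror of A's loop body
def nsStepL (acc : List Char × List Char × Bool) (c : Char) : List Char × List Char × Bool :=
  if c = ' ' then (acc.1, acc.2.1, true)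
  else if acc.2.2 then (acc.1 ++ [c], acc.2.1, acc.2.2)
  else (acc.1, acc.2.1 ++ [c], acc.2.2)

def nsProj (acc : String × String × Bool) : List Char × List Char × Bool :=
  (acc.1.toList, acc.2.1.toList, acc.2.2)

theorem nsStep_hom (acc : String × String × Bool) (c : Char) :
    nsProj (nsStep acc c) = nsStepL (nsProj acc) c := by
  unfold nsStep nsStepL nsProj
  split_ifs <;> simp

theorem foldA_hom (cs : List Char) (acc : String × String × Bool) :
    nsProj (cs.foldl nsStep acc) = cs.foldl nsStepL (nsProj acc) := by
  induction cs generalizing acc with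
  | nil => rfl
  | cons c t ih => simp [List.foldl_cons, ih, nsStep_hom]

theorem foldA_nospace (p : List Char) (f l : List Char) (hp : ∀ c ∈ p, c ≠ ' ') :
    p.foldl nsStepL (f, l, false) = (f, l ++ p, false) := by
  induction p generalizing l with
  | nil => simp
  | cons c t ih =>
    have hc : c ≠ ' ' := hp c (by simp)
    simp only [List.foldl_cons, nsStepL, if_neg hc, if_neg (Bool.false_ne_true)]
    rw [ih (l ++ [c]) (fun x hx => hp x (by simp [hx]))]
    simp

theorem foldA_space (q : List Char) (f l : List Char) :
    q.foldl nsStepL (f, l, true) = (f ++ q.filter (fun c => c ≠ ' '), l, true) := by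
  induction q generalizing f with
  | nil => simp
  | cons c t ih =>
    by_cases hc : c = ' '
    · subst hc
      have h1 : nsStepL (f, l, true) ' ' = (f, l, true) := by simp [nsStepL]
      rw [List.foldl_cons, h1, ih]
      simp
    · have h1 : nsStepL (f, l, true) c = (f ++ [c], l, true) := by simp [nsStepL, hc]
      rw [List.foldl_cons, h1, ih]
      simp [hc]

theorem find_go_space (p : List Char) (q : List Char) (k : Nat) (hp : ∀ c ∈ p, c ≠ ' ') :
    PySem.Chars.find.go [' '] (p ++ ' ' :: q) k = (k : Int) + p.length := by
  induction p generalizing k with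
  | nil => simp [PySem.Chars.find.go, List.isPrefixOf]
  | cons c t ih =>
    have hc : c ≠ ' ' := hp c (by simp)
    have hpf : ([' '].isPrefixOf (c :: (t ++ ' ' :: q))) = false := by
      simp [List.isPrefixOf, Ne.symm hc]
    have hgo : PySem.Chars.find.go [' '] (c :: (t ++ ' ' :: q)) k =
        PySem.Chars.find.go [' '] (t ++ ' ' :: q) (k + 1) := by
      rw [PySem.Chars.find.go, hpf]
      simp
    rw [List.cons_append, hgo, ih (k + 1) (fun x hx => hp x (by simp [hx]))]
    simp only [List.length_cons]; push_cast; ring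

theorem find_space (p q : List Char) (hp : ∀ c ∈ p, c ≠ ' ') :
    PySem.Chars.find (p ++ ' ' :: q) [' '] = (p.length : Int) := by
  unfold PySem.Chars.find
  rw [find_go_space p q 0 hp]; simp

theorem find_nospace (l : List Char) (h : ' ' ∉ l) :
    PySem.Chars.find l [' '] = -1 := by
  rw [PySem.Chars.find_eq_neg_one_iff]
  intro hinf
  exact h (hinf.subset (by simp))

theorem main_eq (str_ : String) : name_shuffler str_ = name_shuffler_alt str_ := by
  apply String.toList_inj.mp
  by_cases hsp : ' ' ∈ str_.toList
  · -- there is a space: split at the first one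
    set l := str_.toList with hl
    set p := l.takeWhile (fun c => c ≠ ' ') with hpdef
    have hdrop : l.dropWhile (fun c => c ≠ ' ') ≠ [] := by
      rw [ne_eq, List.dropWhile_eq_nil_iff]
      push_neg
      exact ⟨' ', hsp, by simp⟩
    have hheadsp : (l.dropWhile (fun c => c ≠ ' ')).head hdrop = ' ' := by
      have := List.head_dropWhile_not (fun c => decide (c ≠ ' ')) hdrop
      simpa using this
    set q := (l.dropWhile (fun c => c ≠ ' ')).tail with hqdef
    have hsplit : l = p ++ ' ' :: q := by
      have h2 : l.dropWhile (fun c => decide (c ≠ ' ')) = ' ' :: q := by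
        conv_lhs => rw [← List.cons_head_tail hdrop]
        rw [hheadsp]
      conv_lhs => rw [← List.takeWhile_append_dropWhile (p := fun c => decide (c ≠ ' ')) (l := l)]
      rw [h2]
    have hp : ∀ c ∈ p, c ≠ ' ' := by
      intro c hc
      have := List.mem_takeWhile_imp hc
      simpa using this
    have hfind : PySem.Str.find str_ " " = (p.length : Int) := by
      rw [PySem.Str.find_eq]
      have : (" " : String).toList = [' '] := by decide
      rw [this, ← hl, hsplit]
      exact find_space p q hp
    have hne : (p.length : Int) ≠ -1 := by omega
    -- A side
    have hA : (name_shuffler str_).toList = q.filter (fun c => c ≠ ' ') ++ ' ' :: p := by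
      unfold name_shuffler
      have hfold : nsProj (str_.toList.foldl nsStep ("", "", false)) =
          (q.filter (fun c => c ≠ ' '), p, true) := by
        have hinit : nsProj ("", "", false) = ([], [], false) := rfl
        rw [foldA_hom, ← hl, hsplit, hinit, List.foldl_append,
          foldA_nospace p [] [] hp, List.nil_append, List.foldl_cons]
        have hstep : nsStepL ([], p, false) ' ' = ([], p, true) := by simp [nsStepL]
        rw [hstep, foldA_space]
        simp
      have h1 : (str_.toList.foldl nsStep ("", "", false)).1.toList = q.filter (fun c => c ≠ ' ') :=
        congrArg Prod.fst hfold
      have h2 : (str_.toList.foldl nsStep ("", "", false)).2.1.toList = p :=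
        congrArg (fun x => x.2.1) hfold
      simp [h1, h2]
    -- B side
    have hB : (name_shuffler_alt str_).toList = q.filter (fun c => c ≠ ' ') ++ ' ' :: p := by
      unfold name_shuffler_alt
      rw [hfind]
      rw [if_neg hne]
      have hrest : (PySem.Str.slice str_ (some ((p.length : Int) + 1)) none).toList = q := by
        rw [PySem.Str.toList_slice, ← hl]
        have : ((p.length : Int) + 1) = ((p.length + 1 : Nat) : Int) := by push_cast; ring
        rw [this, PySem.Chars.slice_eq_listSlice, PySem.List.slice_from_natCast, hsplit]
        simp
      have htake : (PySem.Str.slice str_ none (some (p.length : Int))).toList = p := by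
        rw [PySem.Str.toList_slice, ← hl]
        rw [PySem.Chars.slice_eq_listSlice, PySem.List.slice_to_natCast, hsplit]
        simp
      simp [hrest, htake]
    rw [hA, hB]
  · -- no space at all
    have hfind : PySem.Str.find str_ " " = -1 := by
      rw [PySem.Str.find_eq]
      have : (" " : String).toList = [' '] := by decide
      rw [this]
      exact find_nospace _ hsp
    have hA : (name_shuffler str_).toList = ' ' :: str_.toList := by
      unfold name_shuffler
      have hfold : nsProj (str_.toList.foldl nsStep ("", "", false)) = ([], str_.toList, false) := by
        rw [foldA_hom]
        have hinit : nsProj ("", "", false) = ([], [], false) := rfl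
        have hp : ∀ c ∈ str_.toList, c ≠ ' ' := fun c hc he => hsp (he ▸ hc)
        rw [hinit, foldA_nospace _ [] [] hp]
        simp
      have h1 : (str_.toList.foldl nsStep ("", "", false)).1.toList = [] :=
        congrArg Prod.fst hfold
      have h2 : (str_.toList.foldl nsStep ("", "", false)).2.1.toList = str_.toList :=
        congrArg (fun x => x.2.1) hfold
      simp [h1, h2]
    have hB : (name_shuffler_alt str_).toList = ' ' :: str_.toList := by
      unfold name_shuffler_alt
      rw [hfind, if_pos rfl]
      simp
    rw [hA, hB]

-- ===== VERDICT (by name: the statement is the Claim_ definition above) =====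
theorem name_shuffler_spec : Claim_equal_name_shuffler := by
  intro str_ _
  unfold Spec_name_shuffler
  exact main_eq str_
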